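-- pv_equiv track=rewrite | github.com/swapnasakri/Portfolio_projects | Ecommerce_advanced_recommender_system (6).py | create_binary_labels
-- ===== SOURCE A (Python) =====
-- def create_binary_labels(y_true, y_pred, num_recommendations):
--     y_true_binary = []
--     y_pred_binary = []
--
--     for i in range(len(y_true)):
--         true_product = y_true[i]
--         recommended_products = y_pred[i]
--
--         for j in range(num_recommendations):
--             if j < len(recommended_products):
--                 y_pred_binary.append(1 if recommended_products[j] == true_product else 0)
--                 y_true_binary.append(1 if recommended_products[j] == true_product else 0)
--             else:
--                 y_pred_binary.append(0)
--                 y_true_binary.append(0)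
--
--     return y_true_binary, y_pred_binary
-- ===== SOURCE B (Python) =====
-- def create_binary_labels(y_true, y_pred, num_recommendations):
--     k = max(num_recommendations, 0)
--     labels = []
--     for t, preds in zip(y_true, y_pred):
--         block = [0] * k
--         end = min(k, len(preds))
--         i = 0
--         while True:
--             try:
--                 i = preds.index(t, i, end)
--             except ValueError:
--                 break
--             block[i] = 1
--             i += 1
--         labels += block
--     return labels, list(labels)
-- ===== Notes on version B (the rewrite author's own statement) =====
-- stated objective: alternative
-- what changed: Instead of A's per-slot inner loop that compares every position (with a bounds-check branch) and appends to two parallel lists, B preallocates a [0]*k block per row and uses list.index over a shrinking window to jump directly between matching positions, setting 1s in place, then returns the single accumulated list and a copy of it.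
import Mathlib
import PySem

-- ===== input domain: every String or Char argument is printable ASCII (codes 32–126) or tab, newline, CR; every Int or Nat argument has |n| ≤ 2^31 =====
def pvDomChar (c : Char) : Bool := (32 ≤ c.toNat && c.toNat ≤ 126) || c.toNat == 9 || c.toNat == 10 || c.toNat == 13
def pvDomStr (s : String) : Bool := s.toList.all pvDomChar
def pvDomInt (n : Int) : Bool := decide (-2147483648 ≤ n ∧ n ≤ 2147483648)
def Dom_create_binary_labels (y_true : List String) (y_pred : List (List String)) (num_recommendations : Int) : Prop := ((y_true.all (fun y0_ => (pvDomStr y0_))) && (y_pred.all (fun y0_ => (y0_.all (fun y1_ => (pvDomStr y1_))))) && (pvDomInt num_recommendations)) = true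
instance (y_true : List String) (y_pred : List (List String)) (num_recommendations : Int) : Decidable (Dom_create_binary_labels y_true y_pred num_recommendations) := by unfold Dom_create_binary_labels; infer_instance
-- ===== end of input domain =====

-- B is a different algorithm: per row it preallocates a zero block and uses list.index to
-- jump directly between matching positions (marking 1s in place), instead of A's per-slot
-- bounds-checked comparison appending to two parallel lists; return value only is compared.


-- ===== PORT A =====
-- literal port of A: outer loop over range(len(y_true)), inner loop over
-- range(num_recommendations) with a bounds check, appending to both lists.
-- (indexing y_true[i]/y_pred[i] is in range under Pre_, so pyGetD is exact there)
def create_binary_labels (y_true : List String) (y_pred : List (List String)) (num_recommendations : Int) : List Int × List Int :=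
  (PySem.List.pyRange 0 (y_true.length : Int) 1).foldl
    (fun (acc : List Int × List Int) i =>
      let true_product := PySem.List.pyGetD y_true i ""
      let recommended_products := PySem.List.pyGetD y_pred i []
      (PySem.List.pyRange 0 num_recommendations 1).foldl
        (fun (acc2 : List Int × List Int) j =>
          if j < (recommended_products.length : Int) then
            (acc2.1 ++ [if PySem.List.pyGetD recommended_products j "" == true_product then (1 : Int) else 0],
             acc2.2 ++ [if PySem.List.pyGetD recommended_products j "" == true_product then (1 : Int) else 0])
          else
            (acc2.1 ++ [0], acc2.2 ++ [0])) acc)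
    ([], [])

-- ===== PORT B =====
-- literal port of Source B: `preds.index(t, i, end)` (scan [i, end) for the first match,
-- ValueError = none) is ported as find? over range' i (end-i), exact on that domain.
def pvFindFrom (preds : List String) (t : String) (i e : Nat) : Option Nat :=
  (List.range' i (e - i)).find? (fun j => preds.getD j "" == t)

-- Source B's `while True: i = preds.index(t, i, end); block[i] = 1; i += 1` loop
def pvMarkLoop (preds : List String) (t : String) (e : Nat) (i : Nat) (block : List Int) : List Int :=
  match h : pvFindFrom preds t i e with
  | none => block
  | some j => pvMarkLoop preds t e (j + 1) (block.set j 1)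
termination_by e - i
decreasing_by
  have hj : j ∈ List.range' i (e - i) := List.mem_of_find?_eq_some h
  have := List.mem_range'_1.mp hj
  omega

def create_binary_labels_alt (y_true : List String) (y_pred : List (List String)) (num_recommendations : Int) : List Int × List Int :=
  let k := (max num_recommendations 0).toNat
  let labels := (y_true.zip y_pred).foldl
    (fun (labels : List Int) tp =>
      labels ++ pvMarkLoop tp.2 tp.1 (min k tp.2.length) 0 (List.replicate k 0))
    []
  (labels, labels)

-- ===== PRECONDITION & SPEC =====
-- Pre_ excludes exactly the inputs where A raises IndexError: y_pred shorter than y_true.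
def Pre_create_binary_labels (y_true : List String) (y_pred : List (List String)) (num_recommendations : Int) : Prop :=
  y_true.length ≤ y_pred.length
instance (y_true : List String) (y_pred : List (List String)) (num_recommendations : Int) : Decidable (Pre_create_binary_labels y_true y_pred num_recommendations) := by unfold Pre_create_binary_labels; infer_instance
def pvWitness_create_binary_labels : List String × List (List String) × Int := (["a"], [["a", "b"]], 2)

def Spec_create_binary_labels (y_true : List String) (y_pred : List (List String)) (num_recommendations : Int) (out : List Int × List Int) : Prop := out = create_binary_labels_alt y_true y_pred num_recommendations
instance (y_true : List String) (y_pred : List (List String)) (num_recommendations : Int) (out : List Int × List Int) : Decidable (Spec_create_binary_labels y_true y_pred num_recommendations out) := by unfold Spec_create_binary_labels; infer_instance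

-- ===== CLAIM (what is proved, stated in full; the proofs are below) =====
def Claim_equal_create_binary_labels : Prop := ∀ (y_true : List String) (y_pred : List (List String)) (num_recommendations : Int), Dom_create_binary_labels y_true y_pred num_recommendations → Pre_create_binary_labels y_true y_pred num_recommendations → Spec_create_binary_labels y_true y_pred num_recommendations (create_binary_labels y_true y_pred num_recommendations)

-- ===== LEMMAS AND PROOFS =====

-- the row produced for truth t, recommendations r (matches among the first max(n,0) slots)
def pvRow (t : String) (r : List String) (n : Int) : List Int :=
  (r.take (max n 0).toNat).map (fun p => if p == t then (1 : Int) else 0)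

-- the full block one outer iteration contributes (row then padding)
def pvBlock (t : String) (r : List String) (n : Int) : List Int :=
  pvRow t r n ++ List.replicate (n - ((pvRow t r n).length : Int)).toNat 0

lemma pvBlock_succ (t : String) (r : List String) (m : Nat) :
    pvBlock t r ((m : Int) + 1) =
      pvBlock t r (m : Int) ++
        [if (m : Int) < (r.length : Int) then
           (if PySem.List.pyGetD r (m : Int) "" == t then (1 : Int) else 0) else 0] := by
  by_cases h : m < r.length
  · have hg : PySem.List.pyGetD r (m : Int) "" = r.getD m "" := PySem.List.pyGetD_natCast r m ""
    simp only [pvBlock, pvRow]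
    have hmax1 : (max ((m : Int) + 1) 0).toNat = m + 1 := by omega
    have hmax0 : (max (m : Int) 0).toNat = m := by omega
    rw [hmax1, hmax0]
    have htake : r.take (m + 1) = r.take m ++ [r[m]] := by
      rw [List.take_add_one, List.getElem?_eq_getElem h]; rfl
    have hlen1 : (r.take (m + 1)).length = m + 1 := by
      simp [List.length_take]; omega
    have hlen0 : (r.take m).length = m := by
      simp [List.length_take]; omega
    have hpad1 : (((m : Int) + 1) - (((r.take (m + 1)).map (fun p => if p == t then (1 : Int) else 0)).length : Int)).toNat = 0 := by
      simp only [List.length_map, hlen1]; omega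
    have hpad0 : (((m : Int)) - (((r.take m).map (fun p => if p == t then (1 : Int) else 0)).length : Int)).toNat = 0 := by
      simp only [List.length_map, hlen0]; omega
    rw [hpad1, hpad0]
    have hcond : ((m : Int) < (r.length : Int)) = True := by simp; exact_mod_cast h
    simp only [htake, List.map_append, List.replicate_zero, List.append_nil, hcond, if_true]
    rw [hg]
    simp [List.getD, List.getElem?_eq_getElem h]
  · have hge : r.length ≤ m := Nat.le_of_not_lt h
    simp only [pvBlock, pvRow]
    have hmax1 : (max ((m : Int) + 1) 0).toNat = m + 1 := by omega
    have hmax0 : (max (m : Int) 0).toNat = m := by omega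
    rw [hmax1, hmax0]
    have htake1 : r.take (m + 1) = r := List.take_of_length_le (by omega)
    have htake0 : r.take m = r := List.take_of_length_le hge
    rw [htake1, htake0]
    have hlen : ((r.map (fun p => if p == t then (1 : Int) else 0)).length : Int) = (r.length : Int) := by simp
    rw [hlen]
    have hpad1 : (((m : Int) + 1) - (r.length : Int)).toNat = ((m : Int) - (r.length : Int)).toNat + 1 := by omega
    rw [hpad1, List.replicate_succ' ]
    have hcond : ¬ ((m : Int) < (r.length : Int)) := by exact_mod_cast h
    simp [hcond]

-- A's inner loop over range(m) appends pvBlock to both components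
lemma pvInnerA_nat (t : String) (r : List String) :
    ∀ (m : Nat) (a : List Int × List Int),
      (PySem.List.pyRange 0 (m : Int) 1).foldl
        (fun (acc2 : List Int × List Int) j =>
          if j < (r.length : Int) then
            (acc2.1 ++ [if PySem.List.pyGetD r j "" == t then (1 : Int) else 0],
             acc2.2 ++ [if PySem.List.pyGetD r j "" == t then (1 : Int) else 0])
          else
            (acc2.1 ++ [0], acc2.2 ++ [0])) a
      = (a.1 ++ pvBlock t r (m : Int), a.2 ++ pvBlock t r (m : Int)) := by
  intro m
  induction m with
  | zero =>
      intro a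
      rw [PySem.List.pyRange_one_eq_nil (by norm_num)]
      simp [pvBlock, pvRow]
  | succ k ih =>
      intro a
      have hsplit : PySem.List.pyRange 0 ((k : Int) + 1) 1
          = PySem.List.pyRange 0 (k : Int) 1 ++ [(k : Int)] :=
        PySem.List.pyRange_one_succ_right (by positivity)
      push_cast
      rw [hsplit, List.foldl_append, ih a]
      rw [pvBlock_succ]
      by_cases h : (k : Int) < (r.length : Int) <;> simp [h, List.append_assoc]

-- A's inner loop for arbitrary Int bound
lemma pvInnerA (t : String) (r : List String) (n : Int) (a : List Int × List Int) :
    (PySem.List.pyRange 0 n 1).foldl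
        (fun (acc2 : List Int × List Int) j =>
          if j < (r.length : Int) then
            (acc2.1 ++ [if PySem.List.pyGetD r j "" == t then (1 : Int) else 0],
             acc2.2 ++ [if PySem.List.pyGetD r j "" == t then (1 : Int) else 0])
          else
            (acc2.1 ++ [0], acc2.2 ++ [0])) a
      = (a.1 ++ pvBlock t r n, a.2 ++ pvBlock t r n) := by
  by_cases h : 0 ≤ n
  · have : n = ((n.toNat : Nat) : Int) := (Int.toNat_of_nonneg h).symm
    rw [this]; exact pvInnerA_nat t r n.toNat a
  · have hn : n < 0 := by omega
    rw [PySem.List.pyRange_one_eq_nil (by omega)]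
    have hb : pvBlock t r n = [] := by
      simp only [pvBlock, pvRow]
      have h1 : (max n 0).toNat = 0 := by omega
      rw [h1]
      simp only [List.take_zero, List.map_nil, List.length_nil, Nat.cast_zero, List.nil_append]
      have h2 : (n - 0).toNat = 0 := by omega
      rw [h2, List.replicate_zero]
    simp [hb]

-- the concatenation of the first k blocks (A-side, indexed)
def pvBlocks (y_true : List String) (y_pred : List (List String)) (n : Int) (k : Nat) : List Int :=
  (List.range k).flatMap (fun i => pvBlock (y_true.getD i "") (y_pred.getD i []) n)

lemma pvOuterA (y_true : List String) (y_pred : List (List String)) (n : Int) :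
    ∀ (k : Nat) (a : List Int × List Int),
      (PySem.List.pyRange 0 (k : Int) 1).foldl
        (fun (acc : List Int × List Int) i =>
          let true_product := PySem.List.pyGetD y_true i ""
          let recommended_products := PySem.List.pyGetD y_pred i []
          (PySem.List.pyRange 0 n 1).foldl
            (fun (acc2 : List Int × List Int) j =>
              if j < (recommended_products.length : Int) then
                (acc2.1 ++ [if PySem.List.pyGetD recommended_products j "" == true_product then (1 : Int) else 0],
                 acc2.2 ++ [if PySem.List.pyGetD recommended_products j "" == true_product then (1 : Int) else 0])
              else
                (acc2.1 ++ [0], acc2.2 ++ [0])) acc) a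
      = (a.1 ++ pvBlocks y_true y_pred n k, a.2 ++ pvBlocks y_true y_pred n k) := by
  intro k
  induction k with
  | zero =>
      intro a
      rw [show PySem.List.pyRange 0 ((0 : Nat) : Int) 1 = [] from PySem.List.pyRange_one_eq_nil (by norm_num)]
      simp [pvBlocks]
  | succ m ih =>
      intro a
      have hsplit : PySem.List.pyRange 0 ((m : Int) + 1) 1
          = PySem.List.pyRange 0 (m : Int) 1 ++ [(m : Int)] :=
        PySem.List.pyRange_one_succ_right (by positivity)
      push_cast
      rw [hsplit, List.foldl_append, ih a]
      simp only [List.foldl_cons, List.foldl_nil, PySem.List.pyGetD_natCast]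
      rw [pvInnerA (y_true.getD m "") (y_pred.getD m []) n]
      simp [pvBlocks, List.range_succ, List.append_assoc]

-- ---- B-side lemmas ----

lemma pvFindFrom_none {preds : List String} {t : String} {i e : Nat}
    (h : pvFindFrom preds t i e = none) :
    ∀ x, i ≤ x → x < e → ¬ ((preds.getD x "" == t) = true) := by
  intro x hix hxe
  have hx : x ∈ List.range' i (e - i) := List.mem_range'_1.mpr ⟨hix, by omega⟩
  exact fun hc => (List.find?_eq_none.mp h x hx) hc

lemma pvFindFrom_some {preds : List String} {t : String} {i e j : Nat}
    (h : pvFindFrom preds t i e = some j) :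
    i ≤ j ∧ j < e ∧ (preds.getD j "" == t) = true ∧
      ∀ x, i ≤ x → x < j → ¬ ((preds.getD x "" == t) = true) := by
  have hmem : j ∈ List.range' i (e - i) := List.mem_of_find?_eq_some h
  have hb := List.mem_range'_1.mp hmem
  obtain ⟨hpj, m, hm, hjm, hfirst⟩ := List.find?_eq_some_iff_getElem.mp h
  refine ⟨hb.1, by omega, hpj, ?_⟩
  intro x hix hxj hc
  have hlen : (List.range' i (e - i)).length = e - i := List.length_range'
  have hmx : x - i < m := by
    have : (List.range' i (e - i))[m] = i + 1 * m := List.getElem_range' hm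
    omega
  have hx : (List.range' i (e - i))[x - i]'(by omega) = i + 1 * (x - i) :=
    List.getElem_range' (by omega)
  have := hfirst (x - i) hmx
  rw [hx] at this
  have hxe : i + 1 * (x - i) = x := by omega
  rw [hxe] at this
  rw [Bool.not_eq_eq_eq_not, Bool.not_true] at this
  rw [this] at hc
  exact absurd hc (by decide)

lemma pvMarkLoop_getElem? (preds : List String) (t : String) (e : Nat) :
    ∀ (n i : Nat) (block : List Int), e - i ≤ n → e ≤ block.length → ∀ (x : Nat),
      (pvMarkLoop preds t e i block)[x]? =
        if i ≤ x ∧ x < e ∧ (preds.getD x "" == t) = true then some (1 : Int) else block[x]? := by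
  intro n
  induction n with
  | zero =>
      intro i block hfuel hlen x
      have hfind : pvFindFrom preds t i e = none := by
        unfold pvFindFrom
        have : e - i = 0 := by omega
        rw [this]; rfl
      rw [pvMarkLoop, hfind]
      have hno : ¬ (i ≤ x ∧ x < e ∧ (preds.getD x "" == t) = true) := by
        rintro ⟨h1, h2, _⟩; omega
      rw [if_neg hno]
  | succ n ih =>
      intro i block hfuel hlen x
      rw [pvMarkLoop]
      cases hfind : pvFindFrom preds t i e with
      | none =>
          have hno := pvFindFrom_none hfind
          have hc : ¬ (i ≤ x ∧ x < e ∧ (preds.getD x "" == t) = true) := by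
            rintro ⟨h1, h2, h3⟩; exact hno x h1 h2 h3
          rw [if_neg hc]
      | some j =>
          obtain ⟨hij, hje, hpj, hfirst⟩ := pvFindFrom_some hfind
          rw [ih (j + 1) (block.set j 1) (by omega) (by simp [hlen]) x]
          rw [List.getElem?_set]
          by_cases hx : i ≤ x ∧ x < e ∧ (preds.getD x "" == t) = true
          · rw [if_pos hx]
            by_cases hjx : j + 1 ≤ x
            · rw [if_pos ⟨hjx, hx.2.1, hx.2.2⟩]
            · rw [if_neg (fun hcon => hjx hcon.1)]
              rcases Nat.lt_or_ge x j with hlt | hge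
              · exact absurd hx.2.2 (hfirst x hx.1 hlt)
              · have hjeq : j = x := by omega
                rw [if_pos hjeq, if_pos (show j < block.length by omega)]
          · rw [if_neg hx]
            have h1 : ¬ (j + 1 ≤ x ∧ x < e ∧ (preds.getD x "" == t) = true) := by
              rintro ⟨ha, hb, hc⟩; exact hx ⟨by omega, hb, hc⟩
            have h2 : ¬ j = x := by
              rintro rfl; exact hx ⟨hij, hje, hpj⟩
            rw [if_neg h1, if_neg h2]

lemma pvMark_eq_block (t : String) (r : List String) (n : Int) :
    pvMarkLoop r t (min (max n 0).toNat r.length) 0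
        (List.replicate (max n 0).toNat 0) = pvBlock t r n := by
  apply List.ext_getElem?
  intro x
  set k := (max n 0).toNat with hk
  set e := min k r.length with he
  have hek : e ≤ k := by omega
  rw [pvMarkLoop_getElem? r t e e 0 (List.replicate k 0) (by omega)
      (by rw [List.length_replicate]; exact hek) x]
  have hrowlen : (pvRow t r n).length = e := by
    simp only [pvRow, List.length_map, List.length_take]
    omega
  have hpad : ((n - ((pvRow t r n).length : Int)).toNat) = k - e := by
    rw [hrowlen]; omega
  by_cases hxe : x < e
  · have hxr : x < r.length := by omega
    have hgd : r.getD x "" = r[x] := List.getD_eq_getElem r "" hxr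
    have hxrow : x < (pvRow t r n).length := by omega
    have hrowx : (pvRow t r n)[x]'hxrow = if r[x] == t then (1 : Int) else 0 := by
      simp [pvRow, List.getElem_take]
    have hleft : (pvBlock t r n)[x]? = some (if r[x] == t then (1 : Int) else 0) := by
      rw [pvBlock, List.getElem?_append_left hxrow, List.getElem?_eq_getElem hxrow, hrowx]
    rw [hleft]
    by_cases hm : (r.getD x "" == t) = true
    · rw [if_pos ⟨Nat.zero_le x, hxe, hm⟩]
      rw [hgd] at hm
      rw [hm, if_pos rfl]
    · have hcond : ¬ (0 ≤ x ∧ x < e ∧ (r.getD x "" == t) = true) := fun hcc => hm hcc.2.2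
      rw [if_neg hcond]
      have hm0 : (r.getD x "" == t) = false := Bool.eq_false_iff.mpr hm
      rw [hgd] at hm0
      rw [hm0, if_neg (by decide), List.getElem?_replicate, if_pos (by omega)]
  · have hcond : ¬ (0 ≤ x ∧ x < e ∧ (r.getD x "" == t) = true) := by
      rintro ⟨_, h2, _⟩; omega
    rw [if_neg hcond, List.getElem?_replicate]
    by_cases hxk : x < k
    · rw [if_pos hxk, pvBlock, List.getElem?_append_right (by omega), hpad,
        List.getElem?_replicate, if_pos (by omega)]
    · rw [if_neg hxk, pvBlock]
      rw [List.getElem?_eq_none (by simp [hrowlen]; omega)]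

-- the concatenation of all blocks, zip form (B-side)
def pvBlocksZ (rows : List (String × List String)) (n : Int) : List Int :=
  rows.flatMap (fun tp => pvBlock tp.1 tp.2 n)

lemma pvOuterB (n : Int) :
    ∀ (rows : List (String × List String)) (acc : List Int),
      rows.foldl
        (fun (labels : List Int) tp =>
          labels ++ pvMarkLoop tp.2 tp.1 (min (max n 0).toNat tp.2.length) 0
            (List.replicate (max n 0).toNat 0)) acc
      = acc ++ pvBlocksZ rows n := by
  intro rows
  induction rows with
  | nil => intro acc; simp [pvBlocksZ]
  | cons tp rest ih =>
      intro acc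
      simp only [List.foldl_cons]
      rw [ih, pvMark_eq_block]
      simp [pvBlocksZ, List.append_assoc]

lemma pvBlocks_eq_zip (n : Int) :
    ∀ (ys : List String) (ps : List (List String)), ys.length ≤ ps.length →
      pvBlocks ys ps n ys.length = pvBlocksZ (ys.zip ps) n := by
  intro ys
  induction ys with
  | nil => intro ps _; simp [pvBlocks, pvBlocksZ]
  | cons t rest ih =>
      intro ps hlen
      cases ps with
      | nil => simp at hlen
      | cons r ps' =>
          simp only [List.zip_cons_cons, pvBlocksZ, List.flatMap_cons]
          rw [pvBlocks, List.length_cons, List.range_succ_eq_map, List.flatMap_cons,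
            List.flatMap_map]
          simp only [List.getD_cons_zero, List.getD_cons_succ, Nat.succ_eq_add_one]
          have := ih ps' (by simpa using hlen)
          rw [pvBlocks] at this
          rw [this]
          simp [pvBlocksZ]

-- ===== VERDICT (by name: the statements are the Claim_ definitions above) =====
theorem create_binary_labels_spec : Claim_equal_create_binary_labels := by
  intro y_true y_pred n _ hpre
  show create_binary_labels y_true y_pred n = create_binary_labels_alt y_true y_pred n
  unfold create_binary_labels create_binary_labels_alt
  rw [pvOuterA y_true y_pred n y_true.length ([], [])]
  simp only []
  rw [pvOuterB n (y_true.zip y_pred) []]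
  rw [← pvBlocks_eq_zip n y_true y_pred hpre]
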